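-- pv_equiv track=rewrite | github.com/giorgi13245/GOA-projects-group-46 | day 98/homework/homework.py | change
-- ===== SOURCE A (Python) =====
-- def change(st):
--     new = ""
--     st = st.lower()
--     for i in "abcdefghijklmnopqrstuvwxyz":
--         if i in st:
--             new += "1"
--         else:
--             new += "0"
--     return new
-- ===== SOURCE B (Python) =====
-- def change(st):
--     flags = [False] * 26
--     for c in st.lower():
--         o = ord(c)
--         if 97 <= o <= 122:
--             flags[o - 97] = True
--     return ''.join('1' if f else '0' for f in flags)
-- ===== Notes on version B (the rewrite author's own statement) =====
-- stated objective: alternative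
-- what changed: Replaces A's 26 membership scans of the input (one per alphabet letter) with a single scatter pass that marks a 26-entry boolean table, then emits the flags; asymptotically one pass instead of 26, though CPython's C-level substring search makes A faster in practice.
import Mathlib
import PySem

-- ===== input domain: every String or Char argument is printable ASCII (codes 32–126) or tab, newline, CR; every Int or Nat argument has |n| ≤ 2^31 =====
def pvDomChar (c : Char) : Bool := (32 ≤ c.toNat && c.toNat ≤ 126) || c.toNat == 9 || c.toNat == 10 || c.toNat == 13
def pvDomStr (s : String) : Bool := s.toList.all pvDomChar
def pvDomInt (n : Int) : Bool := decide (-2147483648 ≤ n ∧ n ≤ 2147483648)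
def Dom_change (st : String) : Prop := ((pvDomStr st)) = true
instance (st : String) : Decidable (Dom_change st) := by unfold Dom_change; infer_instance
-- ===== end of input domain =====

-- B: one scatter pass marking a 26-entry flag table instead of A's 26 membership scans (alternative decomposition; no observable mutation).

-- ===== PORT A =====
def change (st : String) : String :=
  let stl := PySem.Str.lower st
  "abcdefghijklmnopqrstuvwxyz".toList.foldl
    (fun new i => if PySem.Str.isIn (String.ofList [i]) stl then new ++ "1" else new ++ "0") ""

-- ===== PORT B =====
def change_alt (st : String) : String :=
  let flags := (PySem.Chars.lower st.toList).foldl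
    (fun fl c => if 97 ≤ c.toNat ∧ c.toNat ≤ 122 then fl.set (c.toNat - 97) true else fl)
    (List.replicate 26 false)
  String.ofList (flags.map (fun f => if f then '1' else '0'))

-- ===== PRECONDITION & SPEC =====
def Spec_change (st : String) (out : String) : Prop := out = change_alt st
instance (st : String) (out : String) : Decidable (Spec_change st out) := by unfold Spec_change; infer_instance

-- ===== CLAIM (what is proved, stated in full; the proofs are below) =====
def Claim_equal_change : Prop := ∀ (st : String), Dom_change st → Spec_change st (change st)

-- ===== LEMMAS AND PROOFS =====

theorem flags_len (L : List Char) (fl : List Bool)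
    : (L.foldl (fun fl c => if 97 ≤ c.toNat ∧ c.toNat ≤ 122 then fl.set (c.toNat - 97) true else fl) fl).length = fl.length := by
  induction L generalizing fl with
  | nil => rfl
  | cons c L ih => simp only [List.foldl_cons]; rw [ih]; split_ifs <;> simp

-- invariant of B's scatter loop: flag j ends set iff it started set or a char of code 97+j occurs
theorem flags_getElem (L : List Char) (fl : List Bool) (j : Nat) (hj : j < fl.length) (hj26 : j < 26)
    : (L.foldl (fun fl c => if 97 ≤ c.toNat ∧ c.toNat ≤ 122 then fl.set (c.toNat - 97) true else fl) fl)[j]'(by rw [flags_len]; exact hj)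
      = (fl[j] || L.any (fun c => c.toNat == 97 + j)) := by
  induction L generalizing fl with
  | nil => simp
  | cons c L ih =>
    simp only [List.foldl_cons, List.any_cons]
    split_ifs with h
    · rw [ih (fl.set (c.toNat - 97) true) (by simpa using hj)]
      by_cases hc : c.toNat = 97 + j
      · have hj' : c.toNat - 97 = j := by omega
        have hb : (c.toNat == 97 + j) = true := by simpa using hc
        rw [hj', List.getElem_set_self (by simpa using hj), hb]
        simp
      · have hb : (c.toNat == 97 + j) = false := by simpa using hc
        rw [List.getElem_set_ne (by omega), hb]
        simp
    · rw [ih fl hj]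
      rw [not_and_or] at h
      have hb : (c.toNat == 97 + j) = false := by
        simp only [beq_eq_false_iff_ne, ne_eq]
        omega
      rw [hb]
      simp

-- A's loop over the alphabet produces one output char per alphabet char
theorem foldA (P : Char → Bool) (l : List Char) (acc : String)
    : (l.foldl (fun new i => if P i then new ++ "1" else new ++ "0") acc).toList
      = acc.toList ++ l.map (fun i => if P i then '1' else '0') := by
  induction l generalizing acc with
  | nil => simp
  | cons c l ih =>
    simp only [List.foldl_cons, List.map_cons]
    split_ifs with h <;> rw [ih] <;> simp

-- a one-char "i in s" test is membership of i, phrased on char codes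
theorem isIn_single (i : Char) (L : List Char)
    : PySem.Chars.isIn [i] L = L.any (fun c => c.toNat == i.toNat) := by
  have h1 : PySem.Chars.isIn [i] L = true ↔ i ∈ L := by
    rw [PySem.Chars.isIn_iff_infix]; exact List.singleton_infix_iff i L
  have h2 : L.any (fun c => c.toNat == i.toNat) = true ↔ i ∈ L := by
    simp only [List.any_eq_true, beq_iff_eq]
    constructor
    · rintro ⟨c, hc, he⟩
      rwa [show c = i from Char.ext (UInt32.toNat_inj.mp he)] at hc
    · intro h; exact ⟨i, h, rfl⟩
  exact Bool.eq_iff_iff.mpr (h1.trans h2.symm)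

-- ===== VERDICT (by name: the statement is the Claim_ definition above) =====
theorem change_spec : Claim_equal_change := by
  intro st _
  unfold Spec_change change change_alt
  apply String.toList_injective
  set L := PySem.Chars.lower st.toList with hL
  have hstl : (PySem.Str.lower st).toList = L := by simp [PySem.Str.lower, hL]
  have key : ∀ (i : Char),
      PySem.Str.isIn (String.ofList [i]) (PySem.Str.lower st) = L.any (fun c => c.toNat == i.toNat) := by
    intro i
    rw [show PySem.Str.isIn (String.ofList [i]) (PySem.Str.lower st)
          = PySem.Chars.isIn (String.ofList [i]).toList (PySem.Str.lower st).toList from by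
        simp [PySem.Str.isIn]]
    rw [hstl]
    simp [isIn_single]
  rw [foldA]
  simp only [String.toList_ofList, key]
  apply List.ext_getElem
  · simp [flags_len]
  intro j hj1 hj2
  have hj : j < 26 := by simpa using hj1
  simp only [List.getElem_map]
  rw [flags_getElem L (List.replicate 26 false) j (by simpa using hj) hj]
  interval_cases j <;> simp
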